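-- pv_equiv track=rewrite | github.com/dkreslo/python-practice | MidTerm.py | wordsWithVowel
-- ===== SOURCE A (Python) =====
-- def wordsWithVowel(string):
--     '''
--     d = {"a": [], "e": [], "i": [], "o": [], "u": []}
--
--     words = string.split()
--     for word in words:
--         for vowel in d:
--             if vowel in word:
--                 d[vowel].append(word)
--     return d
--     '''
--     d = {}
--     vowels = "aeiou"
--     words = string.split()
--     for word in words:
--         for vowel in vowels:
--             if vowel in word:
--                 if vowel in d:
--                     d[vowel].append(word)
--                 else:
--                     d[vowel] = [word]
--     return d
-- ===== SOURCE B (Python) =====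
-- def wordsWithVowel(string):
--     words = string.split()
--     seen = dict.fromkeys(v for w in words for v in "aeiou" if v in w)
--     return {v: [w for w in words if v in w] for v in seen}
-- ===== Notes on version B (the rewrite author's own statement) =====
-- stated objective: idiomatic
-- what changed: A builds the dict incrementally, appending each word to per-vowel lists inside a nested loop; B first computes the key order with dict.fromkeys over the vowel occurrences and then builds each vowel's list in one per-vowel filtering comprehension (transposed nesting).
import Mathlib
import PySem

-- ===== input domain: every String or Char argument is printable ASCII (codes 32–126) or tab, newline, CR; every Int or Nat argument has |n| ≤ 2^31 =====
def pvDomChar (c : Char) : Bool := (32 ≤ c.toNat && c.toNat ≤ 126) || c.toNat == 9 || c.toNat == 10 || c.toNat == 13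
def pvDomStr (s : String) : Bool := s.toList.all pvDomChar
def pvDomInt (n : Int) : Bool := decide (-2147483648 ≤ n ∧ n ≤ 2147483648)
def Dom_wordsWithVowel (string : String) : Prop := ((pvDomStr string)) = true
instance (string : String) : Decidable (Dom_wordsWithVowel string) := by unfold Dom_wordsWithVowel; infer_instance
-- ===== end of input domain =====

-- B replaces A's incremental dict-of-appends with a key-order scan (dict.fromkeys) plus one
-- filtering comprehension per vowel (transposed nesting); same cost, more idiomatic.

-- the vowel literals "aeiou" iterated as 1-char strings (shared literal of both ports)
def pvVowels : List String := ["a", "e", "i", "o", "u"]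

-- ===== PORT A =====
def wordsWithVowel (string : String) : List (String × List String) :=
  let words := PySem.Str.split₀ string
  (words.foldl (fun d word =>
    pvVowels.foldl (fun d vowel =>
      if PySem.Str.isIn vowel word then
        if d.contains vowel then d.modify vowel [] (fun l => l ++ [word])
        else d.insert vowel [word]
      else d) d) PySem.Dict.empty).items

-- ===== PORT B =====
def wordsWithVowel_alt (string : String) : List (String × List String) :=
  let words := PySem.Str.split₀ string
  let seen := PySem.List.dedup (words.flatMap (fun w => pvVowels.filter (fun v => PySem.Str.isIn v w)))
  (seen.foldl (fun d v => d.insert v (words.filter (fun w => PySem.Str.isIn v w))) PySem.Dict.empty).items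

-- ===== PRECONDITION & SPEC =====
def Spec_wordsWithVowel (string : String) (out : List (String × List String)) : Prop := out = wordsWithVowel_alt string
instance (string : String) (out : List (String × List String)) : Decidable (Spec_wordsWithVowel string out) := by unfold Spec_wordsWithVowel; infer_instance

-- ===== CLAIM (what is proved, stated in full; the proofs are below) =====
def Claim_equal_wordsWithVowel : Prop := ∀ (string : String), Dom_wordsWithVowel string → Spec_wordsWithVowel string (wordsWithVowel string)

-- ===== LEMMAS AND PROOFS =====

-- the (vowel, word) update events of A's nested loop, flattened
def pvPairs (words : List String) : List (String × String) :=
  words.flatMap (fun w => (pvVowels.filter (fun v => PySem.Str.isIn v w)).map (fun v => (v, w)))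

def pvStep (d : PySem.Dict String (List String)) (p : String × String) : PySem.Dict String (List String) :=
  d.modify p.1 [] (fun l => l ++ [p.2])

def pvVal (pairs : List (String × String)) (k : String) : List String :=
  (pairs.filter (fun p => p.1 == k)).map (fun p => p.2)

-- A's inner loop over the vowels equals folding pvStep over the word's update events
theorem pv_inner_eq (vs : List String) (w : String) (d : PySem.Dict String (List String)) :
    vs.foldl (fun d vowel =>
      if PySem.Str.isIn vowel w then
        if d.contains vowel then d.modify vowel [] (fun l => l ++ [w])
        else d.insert vowel [w]
      else d) d
    = ((vs.filter (fun v => PySem.Str.isIn v w)).map (fun v => (v, w))).foldl pvStep d := by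
  induction vs generalizing d with
  | nil => rfl
  | cons v vs ih =>
    by_cases h : PySem.Str.isIn v w = true
    · have hstep : (if PySem.Str.isIn v w then
          if d.contains v then d.modify v [] (fun l => l ++ [w])
          else d.insert v [w]
        else d) = pvStep d (v, w) := by
        rw [if_pos h]
        by_cases hc : d.contains v = true
        · rw [if_pos hc]; rfl
        · have hc' : d.contains v = false := by simpa using hc
          rw [if_neg hc]
          show d.insert v [w] = d.insert v (d.getD v [] ++ [w])
          rw [PySem.Dict.getD_of_not_contains d _ hc', List.nil_append]
      rw [List.foldl_cons, hstep,
        List.filter_cons_of_pos (p := fun v => PySem.Str.isIn v w) (l := vs) h,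
        List.map_cons, List.foldl_cons]
      exact ih _
    · rw [List.foldl_cons, if_neg h,
        List.filter_cons_of_neg (p := fun v => PySem.Str.isIn v w) (l := vs) h]
      exact ih d

-- A's whole nested loop equals folding pvStep over all flattened events
theorem pv_outer_eq (words : List String) (d : PySem.Dict String (List String)) :
    words.foldl (fun d word =>
      pvVowels.foldl (fun d vowel =>
        if PySem.Str.isIn vowel word then
          if d.contains vowel then d.modify vowel [] (fun l => l ++ [word])
          else d.insert vowel [word]
        else d) d) d
    = (pvPairs words).foldl pvStep d := by
  induction words generalizing d with
  | nil => rfl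
  | cons w ws ih =>
    simp only [List.foldl_cons, pvPairs, List.flatMap_cons, List.foldl_append]
    rw [pv_inner_eq]
    exact ih _

theorem pv_keys_fold (pairs : List (String × String)) :
    ((pairs.foldl pvStep PySem.Dict.empty)).keys = PySem.List.dedup (pairs.map Prod.fst) := by
  have h := PySem.Dict.keys_foldl_modify_key pairs Prod.fst ([] : List String)
    (fun _ p => (fun l => l ++ [p.2])) PySem.Dict.empty
  simpa [pvStep, PySem.List.dedup_eq_ofList, PySem.Set.update_nil_left] using h

theorem pv_val_append (ps : List (String × String)) (p : String × String) (k : String) :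
    pvVal (ps ++ [p]) k = pvVal ps k ++ (if p.1 == k then [p.2] else []) := by
  unfold pvVal
  rw [List.filter_append, List.map_append]
  congr 1
  by_cases h : p.1 == k <;> simp [h]

theorem pv_dedup_append (xs : List String) (x : String) :
    PySem.List.dedup (xs ++ [x]) = PySem.Set.add (PySem.List.dedup xs) x := by
  rw [PySem.List.dedup_eq_ofList, PySem.Set.ofList_eq_foldl, List.foldl_append]
  simp [← PySem.Set.ofList_eq_foldl, ← PySem.List.dedup_eq_ofList]

-- characterisation of A's accumulated dict: first-encounter keys, filtered word lists
theorem pv_items_fold (pairs : List (String × String)) :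
    ((pairs.foldl pvStep PySem.Dict.empty)).items
    = (PySem.List.dedup (pairs.map Prod.fst)).map (fun k => (k, pvVal pairs k)) := by
  induction pairs using List.reverseRecOn with
  | nil => rfl
  | append_singleton ps p ih =>
    rw [List.foldl_append]
    simp only [List.foldl_cons, List.foldl_nil]
    have hget : (ps.foldl pvStep PySem.Dict.empty).getD p.1 [] = pvVal ps p.1 := by
      simpa [pvVal, pvStep] using
        PySem.Dict.getD_foldl_modify_append ps PySem.Dict.empty p.1
    have hstep : pvStep (ps.foldl pvStep PySem.Dict.empty) p
        = (ps.foldl pvStep PySem.Dict.empty).insert p.1 (pvVal ps p.1 ++ [p.2]) := by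
      rw [pvStep, PySem.Dict.modify, hget]
    rw [hstep]
    rw [List.map_append, List.map_cons, List.map_nil, pv_dedup_append]
    by_cases hc : (ps.foldl pvStep PySem.Dict.empty).contains p.1 = true
    · have hmem : p.1 ∈ PySem.List.dedup (ps.map Prod.fst) := by
        have := (PySem.Dict.contains_iff_mem_keys _ _).mp hc
        rwa [pv_keys_fold] at this
      rw [PySem.Dict.items_insert_of_contains _ _ hc, ih]
      have hadd : PySem.Set.add (PySem.List.dedup (ps.map Prod.fst)) p.1
          = PySem.List.dedup (ps.map Prod.fst) := by
        simp only [PySem.Set.add, PySem.Set.contains_eq_listContains]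
        have hfst : p.1 ∈ ps.map Prod.fst := (PySem.List.mem_dedup _ _).mp hmem
        obtain ⟨q, hq, he⟩ := List.mem_map.mp hfst
        simp only [List.contains_iff_mem, PySem.List.mem_dedup, List.mem_map]
        rw [if_pos ⟨q, hq, he⟩]
      rw [hadd, List.map_map]
      refine List.map_congr_left (fun k _ => ?_)
      by_cases hk : k = p.1
      · subst hk; simp [pv_val_append]
      · have h2 : (p.1 == k) = false := by simpa using (Ne.symm hk)
        simp [pv_val_append, h2, hk]
    · have hc' : (ps.foldl pvStep PySem.Dict.empty).contains p.1 = false := by simpa using hc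
      have hmem : p.1 ∉ PySem.List.dedup (ps.map Prod.fst) := by
        intro hm
        exact hc ((PySem.Dict.contains_iff_mem_keys _ _).mpr (by rwa [pv_keys_fold]))
      have hnotfst : p.1 ∉ ps.map Prod.fst := fun h =>
        hmem ((PySem.List.mem_dedup _ _).mpr h)
      have hval : pvVal ps p.1 = [] := by
        unfold pvVal
        rw [List.filter_eq_nil_iff.mpr, List.map_nil]
        intro q hq hbeq
        exact hnotfst (by
          have : q.1 = p.1 := by simpa using hbeq
          exact this ▸ List.mem_map_of_mem hq)
      rw [PySem.Dict.items_insert_of_not_contains _ _ hc', ih]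
      have hadd : PySem.Set.add (PySem.List.dedup (ps.map Prod.fst)) p.1
          = PySem.List.dedup (ps.map Prod.fst) ++ [p.1] := by
        simp only [PySem.Set.add, PySem.Set.contains_eq_listContains]
        simp only [List.contains_iff_mem, PySem.List.mem_dedup, List.mem_map]
        rw [if_neg (fun h => hnotfst (List.mem_map.mpr h))]
      rw [hadd, List.map_append, List.map_cons, List.map_nil]
      congr 1
      · refine List.map_congr_left (fun k hk => ?_)
        have hne : (p.1 == k) = false := by
          have : k ≠ p.1 := fun h => hmem (h ▸ hk)
          simpa using (Ne.symm this)
        simp [pv_val_append, hne]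
      · simp [pv_val_append, hval]

-- B's dict comprehension over distinct keys lists exactly those keys with their values
theorem pv_items_insert_nodup (ks : List String) (f : String → List String) (h : ks.Nodup) :
    ((ks.foldl (fun d v => d.insert v (f v)) PySem.Dict.empty)).items
    = ks.map (fun v => (v, f v)) := by
  induction ks using List.reverseRecOn with
  | nil => rfl
  | append_singleton ks v ih =>
    obtain ⟨hks, hnot⟩ : ks.Nodup ∧ v ∉ ks := by
      constructor
      · exact h.sublist (List.sublist_append_left _ _)
      · intro hv
        rcases List.nodup_append.mp h with ⟨-, -, hdisj⟩
        exact hdisj v hv v (List.mem_singleton_self v) rfl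
    rw [List.foldl_append]
    simp only [List.foldl_cons, List.foldl_nil]
    have hkeys : ((ks.foldl (fun d v => d.insert v (f v)) PySem.Dict.empty)).keys
        = PySem.Set.ofList ks := by
      simpa [PySem.Set.update_nil_left] using
        PySem.Dict.keys_foldl_insert ks (fun _ v => f v) PySem.Dict.empty
    have hc : ((ks.foldl (fun d v => d.insert v (f v)) PySem.Dict.empty)).contains v = false := by
      have : ¬ (((ks.foldl (fun d v => d.insert v (f v)) PySem.Dict.empty)).contains v = true) := by
        intro hcc
        have := (PySem.Dict.contains_iff_mem_keys _ _).mp hcc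
        rw [hkeys, ← PySem.List.dedup_eq_ofList] at this
        exact hnot ((PySem.List.mem_dedup _ _).mp this)
      simpa using this
    rw [PySem.Dict.items_insert_of_not_contains _ _ hc, ih hks]
    simp

-- per-word events filtered at a vowel k give exactly the words containing k
theorem pv_val_pairs (words : List String) (k : String) (hk : k ∈ pvVowels) :
    pvVal (pvPairs words) k = words.filter (fun w => PySem.Str.isIn k w) := by
  induction words with
  | nil => rfl
  | cons w ws ih =>
    have hgrp : pvVal ((pvVowels.filter (fun v => PySem.Str.isIn v w)).map (fun v => (v, w))) k
        = if PySem.Str.isIn k w then [w] else [] := by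
      unfold pvVal
      rw [List.filter_map, List.map_map]
      have hfil : (pvVowels.filter (fun v => PySem.Str.isIn v w)).filter
          ((fun p => p.1 == k) ∘ (fun v => (v, w))) = if PySem.Str.isIn k w then [k] else [] := by
        rw [List.filter_filter]
        fin_cases hk <;>
          · by_cases hw : PySem.Str.isIn "a" w = true <;>
            by_cases he : PySem.Str.isIn "e" w = true <;>
            by_cases hi : PySem.Str.isIn "i" w = true <;>
            by_cases ho : PySem.Str.isIn "o" w = true <;>
            by_cases hu : PySem.Str.isIn "u" w = true <;>
              simp [pvVowels, List.filter_cons, hw, he, hi, ho, hu]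
      rw [hfil]
      cases hw : PySem.Chars.isIn k.toList w.toList <;>
        simp [PySem.Str.isIn, hw]
    unfold pvPairs
    rw [List.flatMap_cons]
    have hsplit : pvVal ((pvVowels.filter (fun v => PySem.Str.isIn v w)).map (fun v => (v, w))
        ++ ws.flatMap (fun w => (pvVowels.filter (fun v => PySem.Str.isIn v w)).map (fun v => (v, w)))) k
        = pvVal ((pvVowels.filter (fun v => PySem.Str.isIn v w)).map (fun v => (v, w))) k
          ++ pvVal (pvPairs ws) k := by
      unfold pvVal pvPairs
      rw [List.filter_append, List.map_append]
    rw [hsplit, hgrp, List.filter_cons, ih]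
    cases hw : PySem.Chars.isIn k.toList w.toList <;>
      simp [PySem.Str.isIn, hw]

-- the flattened events' keys are exactly B's vowel-occurrence stream
theorem pv_fst_pairs (words : List String) :
    (pvPairs words).map Prod.fst
    = words.flatMap (fun w => pvVowels.filter (fun v => PySem.Str.isIn v w)) := by
  simp [pvPairs, List.map_flatMap, List.map_map, Function.comp_def]

-- the two loop bodies agree for any word list
theorem pv_main (ws : List String) :
    (ws.foldl (fun d word =>
      pvVowels.foldl (fun d vowel =>
        if PySem.Str.isIn vowel word then
          if d.contains vowel then d.modify vowel [] (fun l => l ++ [word])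
          else d.insert vowel [word]
        else d) d) PySem.Dict.empty).items
    = ((PySem.List.dedup (ws.flatMap (fun w => pvVowels.filter (fun v => PySem.Str.isIn v w)))).foldl
        (fun d v => d.insert v (ws.filter (fun w => PySem.Str.isIn v w))) PySem.Dict.empty).items := by
  rw [pv_outer_eq, pv_items_fold, pv_fst_pairs]
  rw [pv_items_insert_nodup _ _ (PySem.List.nodup_dedup _)]
  refine List.map_congr_left (fun k hk => ?_)
  have hkv : k ∈ pvVowels := by
    have := (PySem.List.mem_dedup _ _).mp hk
    obtain ⟨w, _, hw⟩ := List.mem_flatMap.mp this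
    exact List.mem_of_mem_filter hw
  rw [pv_val_pairs _ _ hkv]

-- ===== VERDICT (by name: the statement is the Claim_ definition above) =====
theorem wordsWithVowel_spec : Claim_equal_wordsWithVowel := by
  unfold Claim_equal_wordsWithVowel
  intro s _
  unfold Spec_wordsWithVowel
  exact pv_main (PySem.Str.split₀ s)
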